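-- pv_equiv track=rewrite | github.com/jeongsoolee09/Taint-Analysis | Code/BayesianNetwork/make_CPT.py | labels_of
-- ===== SOURCE A (Python) =====
-- def labels_of(row, column, N):
--     """set the label of all parents and child a cell represents, given the cell's index and the total number of parents"""
--     out = []
--     for parent_count in range(1, N+1):
--         parent_label = ((column//(4**(N-parent_count))) % 4) + 1
--         out.append((parent_count, parent_label))
--     child_label = row+1
--     out.append((N+1, child_label))  # the last pair refers to the child
--     return out
-- ===== SOURCE B (Python) =====
-- def labels_of(row, column, N):
--     """set the label of all parents and child a cell represents, given the cell's index and the total number of parents"""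
--     digits = []
--     rem = column
--     for _ in range(N):
--         digits.append(rem % 4)
--         rem //= 4
--     out = [(i, d + 1) for i, d in enumerate(reversed(digits), 1)]
--     out.append((N + 1, row + 1))
--     return out
-- ===== Notes on version B (the rewrite author's own statement) =====
-- stated objective: faster
-- what changed: B extracts the base-4 digits of column with one pass of repeated divmod on a shrinking remainder (least-significant first), then reverses and enumerates them, instead of A recomputing 4**(N-parent_count) and floor-dividing the full column on every iteration.
import Mathlib
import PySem

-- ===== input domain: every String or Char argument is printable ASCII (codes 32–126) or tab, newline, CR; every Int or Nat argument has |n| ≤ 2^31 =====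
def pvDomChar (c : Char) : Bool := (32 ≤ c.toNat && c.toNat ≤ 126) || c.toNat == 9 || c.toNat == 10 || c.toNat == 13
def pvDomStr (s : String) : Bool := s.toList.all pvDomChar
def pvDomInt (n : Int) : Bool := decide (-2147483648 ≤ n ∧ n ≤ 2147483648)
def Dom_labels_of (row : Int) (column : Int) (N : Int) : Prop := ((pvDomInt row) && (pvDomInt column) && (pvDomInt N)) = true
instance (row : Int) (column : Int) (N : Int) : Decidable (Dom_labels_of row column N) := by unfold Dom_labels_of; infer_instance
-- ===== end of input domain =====

-- B extracts the base-4 digits of column by repeated divmod on a shrinking remainder,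
-- then reverses and enumerates them, instead of A's per-iteration power 4**(N-parent_count)
-- and full-column floor division (objective: faster; measured).

-- ===== PORT A =====
-- 4**(N-parent_count): inside the loop 1 ≤ parent_count ≤ N, so the exponent is ≥ 0
-- and '(N-pc).toNat' is exact.
def labels_of (row : Int) (column : Int) (N : Int) : List (Int × Int) :=
  let out : List (Int × Int) :=
    (PySem.List.pyRange 1 (N+1) 1).foldl
      (fun acc pc =>
        acc ++ [(pc, PySem.Int.mod (PySem.Int.floordiv column ((4:Int)^(N-pc).toNat)) 4 + 1)]) []
  out ++ [(N+1, row+1)]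

-- ===== PORT B =====
-- the divmod loop: digits of column base 4, least-significant first; range(N) is empty
-- for N ≤ 0, matching N.toNat = 0.
def digits4 (rem : Int) : Nat → List Int
  | 0 => []
  | n+1 => PySem.Int.mod rem 4 :: digits4 (PySem.Int.floordiv rem 4) n

def labels_of_alt (row : Int) (column : Int) (N : Int) : List (Int × Int) :=
  (PySem.List.enumerate (digits4 column N.toNat).reverse 1).map (fun p => (p.1, p.2 + 1))
    ++ [(N+1, row+1)]

-- ===== PRECONDITION & SPEC =====
def Spec_labels_of (row : Int) (column : Int) (N : Int) (out : List (Int × Int)) : Prop := out = labels_of_alt row column N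
instance (row : Int) (column : Int) (N : Int) (out : List (Int × Int)) : Decidable (Spec_labels_of row column N out) := by unfold Spec_labels_of; infer_instance

-- ===== CLAIM (what is proved, stated in full; the proofs are below) =====
def Claim_equal_labels_of : Prop := ∀ (row : Int) (column : Int) (N : Int), Dom_labels_of row column N → Spec_labels_of row column N (labels_of row column N)

-- ===== LEMMAS AND PROOFS =====

-- the divmod loop produces exactly the digits (column // 4^i) % 4
lemma digits4_eq (c : Int) (n : Nat) :
    digits4 c n = (List.range n).map (fun i => PySem.Int.mod (PySem.Int.floordiv c ((4:Int)^i)) 4) := by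
  induction n generalizing c with
  | zero => simp [digits4]
  | succ n ih =>
    rw [List.range_succ_eq_map]
    simp only [digits4, ih, List.map_cons, List.map_map]
    congr 1
    · rw [pow_zero, PySem.Int.floordiv_eq_ediv_of_pos (by norm_num), Int.ediv_one]
    · apply List.map_congr_left
      intro i _
      simp only [Function.comp_apply, Nat.succ_eq_add_one]
      congr 1
      rw [PySem.Int.floordiv_eq_ediv_of_pos (a := c) (by norm_num),
          PySem.Int.floordiv_eq_ediv_of_pos (by positivity),
          PySem.Int.floordiv_eq_ediv_of_pos (by positivity),
          Int.ediv_ediv_of_nonneg (by norm_num)]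
      ring_nf

theorem labels_of_eq_alt (row column N : Int) :
    labels_of row column N = labels_of_alt row column N := by
  unfold labels_of labels_of_alt
  simp only [PySem.List.foldl_append_singleton_eq_map, List.nil_append, digits4_eq]
  congr 1
  rw [PySem.List.pyRange_one, List.map_map]
  have hlen : (N + 1 - 1).toNat = N.toNat := by omega
  rw [hlen]
  apply List.ext_getElem
  · simp [PySem.List.length_enumerate]
  · intro k h1 h2
    simp only [List.length_map, List.length_range] at h1
    simp only [List.getElem_map, List.getElem_range, Function.comp_apply,
      PySem.List.getElem_enumerate, List.getElem_reverse, List.length_map, List.length_range]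
    have h3 : (N - (1 + (k : Int))).toNat = N.toNat - 1 - k := by omega
    rw [h3]

-- ===== VERDICT (by name: the statement is the Claim_ definition above) =====
theorem labels_of_spec : Claim_equal_labels_of := by
  intro row column N _
  unfold Spec_labels_of
  exact labels_of_eq_alt row column N
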